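-- pv_equiv track=rewrite | github.com/chebozh/coding_challenges_solutions | edabit_solutions/lvl2_lvl3/word_rank.py | word_rank
-- ===== SOURCE A (Python) =====
-- import string
--
-- def word_rank(txt):
--     words = "".join(ch for ch in txt
--                     if ch not in string.punctuation
--                     and not ch.isdigit()).split()
--     scores = []
--
--     for word in words:
--         word_score = 0
--         word_idx = words.index(word)
--         for ch in word:
--             if ch.islower():
--                 word_score += string.ascii_lowercase.index(ch) + 1
--             else:
--                 word_score += string.ascii_uppercase.index(ch) + 1
--         scores.append((word, word_idx, word_score))
--     return max(scores, key=lambda x: (x[-1], x[1]))[0]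
-- ===== SOURCE B (Python) =====
-- import string
--
-- def word_rank(txt):
--     cleaned = "".join(ch for ch in txt
--                       if ch not in string.punctuation and not ch.isdigit())
--     words = cleaned.split()
--     first_idx = {}
--     for i, w in enumerate(words):
--         first_idx.setdefault(w, i)
--     ranked = sorted(
--         ((w, first_idx[w], sum(string.ascii_lowercase.index(c.lower()) + 1 for c in w))
--          for w in words),
--         key=lambda t: (t[2], t[1]),
--         reverse=True)
--     return ranked[0][0]
-- ===== Notes on version B (the rewrite author's own statement) =====
-- stated objective: alternative
-- what changed: B replaces A's per-word words.index inner scan with a single setdefault dict pass recording first-occurrence indices, and replaces A's max() scan with a stable descending sort by (score, first_index) whose head is returned.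
import Mathlib
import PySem

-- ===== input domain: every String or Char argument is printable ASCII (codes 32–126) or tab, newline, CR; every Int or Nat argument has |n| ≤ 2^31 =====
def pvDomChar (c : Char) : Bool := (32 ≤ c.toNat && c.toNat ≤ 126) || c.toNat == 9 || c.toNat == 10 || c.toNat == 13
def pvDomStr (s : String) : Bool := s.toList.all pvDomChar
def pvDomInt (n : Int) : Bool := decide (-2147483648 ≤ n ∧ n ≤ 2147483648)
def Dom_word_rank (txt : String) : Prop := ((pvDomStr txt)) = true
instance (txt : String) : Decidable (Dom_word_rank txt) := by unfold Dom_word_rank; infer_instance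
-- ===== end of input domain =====

-- B replaces A's per-word words.index inner scan by one first-index dict pass and A's max scan by a
-- descending (score, first_index) sort whose head is returned (alternative ranking decomposition).

-- string.punctuation / string.ascii_lowercase / string.ascii_uppercase
def pvPunct : List Char := ['!','"','#','$','%','&','\'','(',')','*','+',',','-','.','/',':',';','<','=','>','?','@','[','\\',']','^','_','`','{','|','}','~']
def pvLow : List Char := ['a','b','c','d','e','f','g','h','i','j','k','l','m','n','o','p','q','r','s','t','u','v','w','x','y','z']
def pvUp : List Char := ['A','B','C','D','E','F','G','H','I','J','K','L','M','N','O','P','Q','R','S','T','U','V','W','X','Y','Z']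

-- ===== PORT A =====
-- inner loop 'for ch in word': ascii_lowercase.index(ch)+1 / ascii_uppercase.index(ch)+1
-- (.getD 0 is never reached on admitted inputs: .index only runs on chars present in the list there)
def pvScoreA (w : List Char) : Nat :=
  w.foldl (fun s ch =>
    if PySem.Chars.islower ch then s + ((PySem.List.index? pvLow ch).getD 0 + 1)
    else s + ((PySem.List.index? pvUp ch).getD 0 + 1)) 0

def word_rank (txt : String) : String :=
  let words := PySem.Chars.split₀ (txt.toList.filter (fun ch => !(pvPunct.contains ch) && !(PySem.Chars.isdigit ch)))
  let scores := words.map (fun w => (w, ((PySem.List.index? words w).getD 0 : Int), pvScoreA w))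
  match PySem.List.max2? scores (fun t => t.2.2) (fun t => t.2.1) with
  | some m => String.ofList m.1
  | none => ""    -- Python raises ValueError (max of an empty list) here; excluded by Pre_

-- ===== PORT B =====
-- first_idx = {}; for i, w in enumerate(words): first_idx.setdefault(w, i)
def pvFirstIdx (words : List (List Char)) : PySem.Dict (List Char) Int :=
  (PySem.List.enumerate words).foldl (fun d p => d.setdefault p.2 p.1) PySem.Dict.empty

-- sum(string.ascii_lowercase.index(c.lower()) + 1 for c in w)
def pvScoreB (w : List Char) : Nat :=
  (w.map (fun c => (PySem.List.index? pvLow (PySem.Chars.lowerChar c)).getD 0 + 1)).sum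

def word_rank_alt (txt : String) : String :=
  let words := PySem.Chars.split₀ (txt.toList.filter (fun ch => !(pvPunct.contains ch) && !(PySem.Chars.isdigit ch)))
  let ranked := PySem.List.sorted2
      (words.map (fun w => (w, (pvFirstIdx words).getD w 0, pvScoreB w)))
      (fun t => t.2.2) (fun t => t.2.1) true
  match ranked with
  | t :: _ => String.ofList t.1
  | [] => ""    -- Python raises IndexError (ranked[0]) here; excluded by Pre_

-- ===== PRECONDITION & SPEC =====
-- Pre_ excludes inputs with no word left after stripping punctuation and digits: there A raises
-- ValueError (max() of an empty sequence) and B raises IndexError.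
def Pre_word_rank (txt : String) : Prop :=
  txt.toList.any (fun ch => !(pvPunct.contains ch) && !(PySem.Chars.isdigit ch) && !(PySem.Chars.isspace ch)) = true
instance (txt : String) : Decidable (Pre_word_rank txt) := by unfold Pre_word_rank; infer_instance
def pvWitness_word_rank : String := "The cat"

def Spec_word_rank (txt : String) (out : String) : Prop := out = word_rank_alt txt
instance (txt : String) (out : String) : Decidable (Spec_word_rank txt out) := by unfold Spec_word_rank; infer_instance

-- ===== CLAIM (what is proved, stated in full; the proofs are below) =====
def Claim_equal_word_rank : Prop := ∀ (txt : String), Dom_word_rank txt → Pre_word_rank txt → Spec_word_rank txt (word_rank txt)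

-- ===== LEMMAS AND PROOFS =====

theorem pv_mem_low {c : Char} (h1 : 'a' ≤ c) (h2 : c ≤ 'z') : c ∈ pvLow := by
  have hofn : Char.ofNat c.toNat = c := Char.ofNat_toNat c
  have hl : 97 ≤ c.toNat := h1
  have hr : c.toNat ≤ 122 := h2
  interval_cases h : c.toNat <;> rw [← hofn] <;> decide

theorem pv_mem_up {c : Char} (h1 : 'A' ≤ c) (h2 : c ≤ 'Z') : c ∈ pvUp := by
  have hofn : Char.ofNat c.toNat = c := Char.ofNat_toNat c
  have hl : 65 ≤ c.toNat := h1
  have hr : c.toNat ≤ 90 := h2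
  interval_cases h : c.toNat <;> rw [← hofn] <;> decide

-- A's two-branch letter score equals B's lower-then-index letter score, on every Char
theorem pv_char_score (c : Char) :
    (if PySem.Chars.islower c then (PySem.List.index? pvLow c).getD 0 + 1
     else (PySem.List.index? pvUp c).getD 0 + 1) =
    (PySem.List.index? pvLow (PySem.Chars.lowerChar c)).getD 0 + 1 := by
  by_cases hl : c ∈ pvLow
  · fin_cases hl <;> decide
  by_cases hu : c ∈ pvUp
  · fin_cases hu <;> decide
  have hlow : PySem.Chars.islower c = false := by
    by_contra h
    rw [Bool.not_eq_false, PySem.Chars.islower, Bool.and_eq_true, decide_eq_true_iff, decide_eq_true_iff] at h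
    exact hl (pv_mem_low h.1 h.2)
  have hup : PySem.Chars.isupper c = false := by
    by_contra h
    rw [Bool.not_eq_false, PySem.Chars.isupper, Bool.and_eq_true, decide_eq_true_iff, decide_eq_true_iff] at h
    exact hu (pv_mem_up h.1 h.2)
  have h1' : List.idxOf? c pvLow = none := by
    rw [← PySem.List.index?_eq_idxOf?]
    exact (PySem.List.index?_eq_none_iff _ _).mpr hl
  have h2' : List.idxOf? c pvUp = none := by
    rw [← PySem.List.index?_eq_idxOf?]
    exact (PySem.List.index?_eq_none_iff _ _).mpr hu
  simp [hlow, PySem.Chars.lowerChar, hup, h1', h2']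

theorem pv_scoreA_go (w : List Char) : ∀ (a : Nat),
    w.foldl (fun s ch =>
      if PySem.Chars.islower ch then s + ((PySem.List.index? pvLow ch).getD 0 + 1)
      else s + ((PySem.List.index? pvUp ch).getD 0 + 1)) a =
    a + (w.map (fun c => (PySem.List.index? pvLow (PySem.Chars.lowerChar c)).getD 0 + 1)).sum := by
  induction w with
  | nil => intro a; simp
  | cons c w ih =>
    intro a
    rw [List.foldl_cons, ih, List.map_cons, List.sum_cons]
    have hstep : (if PySem.Chars.islower c then a + ((PySem.List.index? pvLow c).getD 0 + 1)
        else a + ((PySem.List.index? pvUp c).getD 0 + 1)) =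
        a + ((PySem.List.index? pvLow (PySem.Chars.lowerChar c)).getD 0 + 1) := by
      rw [← pv_char_score c]; split <;> rfl
    rw [hstep]; omega

theorem pv_score_eq (w : List Char) : pvScoreA w = pvScoreB w := by
  unfold pvScoreA pvScoreB
  rw [pv_scoreA_go w 0, Nat.zero_add]

theorem pv_idxOf?_of_mem {w : List Char} {l : List (List Char)} (h : w ∈ l) :
    List.idxOf? w l = some (l.idxOf w) := by
  induction l with
  | nil => cases h
  | cons x xs ih =>
    by_cases hx : x = w
    · subst hx; simp [List.idxOf?_cons]
    · have hm : w ∈ xs := by cases h with | head => exact absurd rfl hx | tail _ h => exact h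
      simp [List.idxOf?_cons, beq_iff_eq, hx, ih hm]

theorem pv_fi_get? (l : List (List Char)) : ∀ (s : Int) (d : PySem.Dict (List Char) Int) (w : List Char),
    ((PySem.List.enumerate l s).foldl (fun d p => d.setdefault p.2 p.1) d).get? w =
    ((d.get? w).orElse (fun _ => if w ∈ l then some (s + (l.idxOf w : Int)) else none)) := by
  induction l with
  | nil =>
    intro s d w
    cases hd : d.get? w <;> simp [PySem.List.enumerate_nil, hd, Option.orElse]
  | cons x xs ih =>
    intro s d w
    rw [PySem.List.enumerate_cons, List.foldl_cons, ih]
    by_cases hwx : w = x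
    · subst hwx
      rw [PySem.Dict.get?_setdefault_self]
      cases hd : d.get? w with
      | some v => simp
      | none => simp [Option.orElse]
    · rw [PySem.Dict.get?_setdefault_of_ne _ _ hwx]
      have hbx : (x == w) = false := by simp; exact fun h => hwx h.symm
      cases hd : d.get? w with
      | some v => rfl
      | none =>
        simp only [Option.orElse]
        by_cases hm : w ∈ xs
        · have hmc : w ∈ x :: xs := List.mem_cons_of_mem _ hm
          simp [hm, hmc, List.idxOf_cons, hbx]
          ring
        · have hnc : ¬ w ∈ x :: xs := by simp [hwx, hm]
          simp [hm, hnc]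

theorem pv_idx_eq (words : List (List Char)) {w : List Char} (hw : w ∈ words) :
    ((PySem.List.index? words w).getD 0 : Int) = (pvFirstIdx words).getD w 0 := by
  have hget : (pvFirstIdx words).get? w = some ((0 : Int) + (words.idxOf w : Int)) := by
    unfold pvFirstIdx
    rw [pv_fi_get? words 0 PySem.Dict.empty w]
    have hemp : (PySem.Dict.empty : PySem.Dict (List Char) Int).get? w = none := by simp [pysem]
    simp [hemp, hw, Option.orElse]
  rw [PySem.List.index?_eq_idxOf?, pv_idxOf?_of_mem hw]
  simp [PySem.Dict.getD, hget]

theorem pv_head_foldl_insertBy {α : Type} (before : α → α → Bool) (xs : List α) : ∀ (acc : List α),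
    (xs.foldl (fun acc x => PySem.List.insertBy before x acc) acc).head? =
    xs.foldl (fun o x => (match o with
                          | none => some x
                          | some m => if before x m then some x else some m)) acc.head? := by
  induction xs with
  | nil => intro acc; rfl
  | cons x xs ih =>
    intro acc
    rw [List.foldl_cons, List.foldl_cons, ih]
    congr 1
    cases acc with
    | nil => rfl
    | cons y ys => by_cases hb : before x y = true <;> simp [PySem.List.insertBy, hb]

-- the head of B's stable descending (score, idx) sort is A's max(…, key=(score, idx))
theorem pv_head_sorted2_rev (xs : List (List Char × Int × Nat)) :
    (PySem.List.sorted2 xs (fun t => t.2.2) (fun t => t.2.1) true).head? =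
    PySem.List.max2? xs (fun t => t.2.2) (fun t => t.2.1) := by
  simpa only [PySem.List.sorted2, PySem.List.max2?] using
    pv_head_foldl_insertBy
      (fun a b => decide ((b.2.2 : Nat) < a.2.2) || (!decide (a.2.2 < b.2.2) && decide ((b.2.1 : Int) < a.2.1))) xs []

theorem pv_core (words : List (List Char)) :
    (match PySem.List.max2? (words.map (fun w => (w, ((PySem.List.index? words w).getD 0 : Int), pvScoreA w)))
        (fun t => t.2.2) (fun t => t.2.1) with
     | some m => String.ofList m.1
     | none => "") =
    (match PySem.List.sorted2 (words.map (fun w => (w, (pvFirstIdx words).getD w 0, pvScoreB w)))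
        (fun t => t.2.2) (fun t => t.2.1) true with
     | t :: _ => String.ofList t.1
     | [] => "") := by
  have hmap : words.map (fun w => (w, ((PySem.List.index? words w).getD 0 : Int), pvScoreA w)) =
      words.map (fun w => (w, (pvFirstIdx words).getD w 0, pvScoreB w)) := by
    apply List.map_congr_left
    intro w hw
    rw [pv_idx_eq words hw, pv_score_eq w]
  rw [hmap, ← pv_head_sorted2_rev]
  cases PySem.List.sorted2 (words.map (fun w => (w, (pvFirstIdx words).getD w 0, pvScoreB w)))
      (fun t => t.2.2) (fun t => t.2.1) true with
  | nil => rfl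
  | cons t r => rfl

-- ===== VERDICT (by name: the statement is the Claim_ definition above) =====
theorem word_rank_spec : Claim_equal_word_rank := by
  intro txt _ _
  exact pv_core (PySem.Chars.split₀ (txt.toList.filter (fun ch => !(pvPunct.contains ch) && !(PySem.Chars.isdigit ch))))
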